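-- pv_equiv track=rewrite | github.com/lovetonight/Credit-Score-Classification | support_function/evaluate.py | labeling
-- ===== SOURCE A (Python) =====
-- def labeling(scores):
--     label = []
--     for score in scores:
--         if  score < 580:
--             label.append(0)
--         elif score >=580 and score < 670:
--             label.append(1)
--         elif score >= 670 and score < 740:
--             label.append(2)
--         elif score >= 740 and score < 800:
--             label.append(3)
--         elif score >= 800:
--             label.append(4)
--     return label
-- ===== SOURCE B (Python) =====
-- import bisect
--
-- _BOUNDS = [580, 670, 740, 800]
--
-- def labeling(scores):
--     return [bisect.bisect_right(_BOUNDS, s) for s in scores]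
-- ===== Notes on version B (the rewrite author's own statement) =====
-- stated objective: idiomatic
-- what changed: Replaced the five-branch if/elif chain building a list with append by a single list comprehension that binary-searches the precomputed breakpoint table [580,670,740,800] via bisect_right, whose insertion index is exactly the label 0..4.
import Mathlib
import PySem

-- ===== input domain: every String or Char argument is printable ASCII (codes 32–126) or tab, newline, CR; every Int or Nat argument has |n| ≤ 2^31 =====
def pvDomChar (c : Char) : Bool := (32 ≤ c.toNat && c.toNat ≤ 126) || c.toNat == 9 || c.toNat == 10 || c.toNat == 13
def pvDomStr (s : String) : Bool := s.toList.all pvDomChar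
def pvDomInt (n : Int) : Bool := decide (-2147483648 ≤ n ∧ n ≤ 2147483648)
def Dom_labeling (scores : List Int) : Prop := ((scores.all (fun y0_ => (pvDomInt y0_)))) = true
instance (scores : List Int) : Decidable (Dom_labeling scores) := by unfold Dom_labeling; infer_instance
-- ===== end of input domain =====

-- B replaces A's if/elif chain by a bisect_right binary search over the breakpoint table [580,670,740,800] (idiomatic, same cost).


-- ===== PORT A =====
-- literal transliteration of A: fold over scores, if/elif chain appending a label (no branch appends nothing)
def labeling (scores : List Int) : List Int :=
  scores.foldl (fun label score =>
    if score < 580 then label ++ [0]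
    else if score ≥ 580 ∧ score < 670 then label ++ [1]
    else if score ≥ 670 ∧ score < 740 then label ++ [2]
    else if score ≥ 740 ∧ score < 800 then label ++ [3]
    else if score ≥ 800 then label ++ [4]
    else label) []

-- ===== PORT B =====
-- port of Python's bisect.bisect_right: binary search with lo/hi, mid = (lo+hi)//2
def bisectRight (a : List Int) (x : Int) (lo hi : Nat) : Nat :=
  if _h : lo < hi then
    let mid := (lo + hi) / 2
    if x < a.getD mid 0 then bisectRight a x lo mid
    else bisectRight a x (mid + 1) hi
  else lo
termination_by hi - lo
decreasing_by all_goals omega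

def labeling_alt (scores : List Int) : List Int :=
  scores.map (fun s => (bisectRight [580, 670, 740, 800] s 0 4 : Int))

-- ===== PRECONDITION & SPEC =====
def Spec_labeling (scores : List Int) (out : List Int) : Prop := out = labeling_alt scores
instance (scores : List Int) (out : List Int) : Decidable (Spec_labeling scores out) := by unfold Spec_labeling; infer_instance

-- ===== CLAIM (what is proved, stated in full; the proofs are below) =====
def Claim_equal_labeling : Prop := ∀ (scores : List Int), Dom_labeling scores → Spec_labeling scores (labeling scores)

-- ===== LEMMAS AND PROOFS =====
theorem bisectRight_eval (s : Int) :
    (bisectRight [580, 670, 740, 800] s 0 4 : Int)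
      = if s < 580 then 0 else if s < 670 then 1 else if s < 740 then 2 else if s < 800 then 3 else 4 := by
  have u : ∀ lo hi : Nat, lo < hi →
      bisectRight [580, 670, 740, 800] s lo hi
        = (if s < ([580, 670, 740, 800].getD ((lo+hi)/2) 0 : Int)
           then bisectRight [580, 670, 740, 800] s lo ((lo+hi)/2)
           else bisectRight [580, 670, 740, 800] s ((lo+hi)/2 + 1) hi) := by
    intro lo hi h; rw [bisectRight]; simp [h]
  have b : ∀ lo : Nat, bisectRight [580, 670, 740, 800] s lo lo = lo := by
    intro lo; rw [bisectRight]; simp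
  rw [u 0 4 (by norm_num)]
  norm_num [List.getD]
  split_ifs with h2 h0 h1 h3 <;>
    simp_all [u 0 2, u 0 1, u 2 4, u 2 3, u 1 2, u 3 4, b, List.getD] <;> omega

theorem labeling_acc (scores : List Int) (acc : List Int) :
    scores.foldl (fun label score =>
      if score < 580 then label ++ [0]
      else if score ≥ 580 ∧ score < 670 then label ++ [1]
      else if score ≥ 670 ∧ score < 740 then label ++ [2]
      else if score ≥ 740 ∧ score < 800 then label ++ [3]
      else if score ≥ 800 then label ++ [4]
      else label) acc
    = acc ++ labeling_alt scores := by
  induction scores generalizing acc with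
  | nil => simp [labeling_alt]
  | cons s t ih =>
    simp only [List.foldl_cons, labeling_alt, List.map_cons]
    rw [ih]
    rw [bisectRight_eval s]
    clear ih
    split_ifs with h1 h2 h3 h4 h5 <;> simp [labeling_alt] <;> omega

-- ===== VERDICT (by name: the statement is the Claim_ definition above) =====
theorem labeling_spec : Claim_equal_labeling := by
  intro scores _
  unfold Spec_labeling labeling
  simpa using labeling_acc scores []
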